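-- pv_equiv track=rewrite | github.com/ace-design/nlp-stories | setup_data/jsonl_to_human_readable.py | identify_primary_entity
-- ===== SOURCE A (Python) =====
-- def identify_primary_entity(primary_action_id_list, target_action, target_entity):
--     '''
--      identify primary entities
--
--     Parameters:
--         primary_action_id_list (list): contains all the primary actions in the story
--         target_action (2D list): contains all ids and corresponding actions in the target relations
--         target_entity (2D list): contains all ids and corresponding entities in the target relations
--
--     Returns:
--         primary_entities (str): indentified primary entities
--         primary_entity_list (list): indentified primary entities
--     '''
--
--     primary_entities = ""
--     primary_entity_list = []
--
--
--     for primary_action_id in primary_action_id_list: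
--         for i in range(len(target_action)):
--             if primary_action_id == target_action[i][0]:
--                 if not(target_entity[i][1] in primary_entity_list):
--                     primary_entities += target_entity[i][1] + ", "
--                     primary_entity_list.append(target_entity[i][1])
--
--     return primary_entities, primary_entity_list
-- ===== SOURCE B (Python) =====
-- def identify_primary_entity(primary_action_id_list, target_action, target_entity):
--     # index nonempty target_action rows by their id once; per primary id, walk only its
--     # matching row positions; dedup with a set alongside the ordered result list
--     positions = {}
--     for i, row in enumerate(target_action):
--         if row:
--             positions.setdefault(row[0], []).append(i)
--
--     seen = set()
--     primary_entity_list = []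
--     for primary_action_id in primary_action_id_list:
--         for i in positions.get(primary_action_id, []):
--             entity = target_entity[i][1]
--             if entity not in seen:
--                 seen.add(entity)
--                 primary_entity_list.append(entity)
--
--     primary_entities = "".join(entity + ", " for entity in primary_entity_list)
--     return primary_entities, primary_entity_list
-- ===== Notes on version B (the rewrite author's own statement) =====
-- stated objective: alternative
-- what changed: B replaces A's rescan of all of target_action for every primary id by a dict index from action id to its row positions built once (skipping empty rows), with a set for the dedup membership test, and builds the string by one join at the end; intended as faster, measured only ~1.6x at the largest size both finished.
import Mathlib
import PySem

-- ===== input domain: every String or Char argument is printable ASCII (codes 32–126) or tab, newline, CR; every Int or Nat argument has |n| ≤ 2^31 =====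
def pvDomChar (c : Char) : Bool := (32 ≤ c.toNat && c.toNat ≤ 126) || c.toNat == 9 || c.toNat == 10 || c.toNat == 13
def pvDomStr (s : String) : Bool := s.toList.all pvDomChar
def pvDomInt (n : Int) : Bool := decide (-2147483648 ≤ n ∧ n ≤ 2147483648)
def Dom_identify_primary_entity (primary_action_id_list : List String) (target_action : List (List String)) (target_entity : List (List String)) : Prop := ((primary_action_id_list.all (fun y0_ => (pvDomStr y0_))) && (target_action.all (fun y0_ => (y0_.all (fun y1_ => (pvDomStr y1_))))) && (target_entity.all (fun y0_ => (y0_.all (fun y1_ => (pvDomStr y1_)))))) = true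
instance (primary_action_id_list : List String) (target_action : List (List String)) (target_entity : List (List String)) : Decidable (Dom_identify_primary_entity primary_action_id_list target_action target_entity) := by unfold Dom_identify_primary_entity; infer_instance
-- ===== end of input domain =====

-- B builds a dict index from action id to its row positions once (skipping empty rows)
-- and dedups with a set, instead of A's rescan of all of target_action for every
-- primary id (objective: alternative; a different traversal of the same data).

-- ===== PORT A =====
def identify_primary_entity (primary_action_id_list : List String) (target_action : List (List String)) (target_entity : List (List String)) : String × List String :=
  primary_action_id_list.foldl (fun st primary_action_id =>
    (PySem.List.pyRange 0 (target_action.length : Int) 1).foldl (fun st i =>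
      if primary_action_id == PySem.List.pyGetD (PySem.List.pyGetD target_action i []) 0 "" then
        if PySem.List.pyGetD (PySem.List.pyGetD target_entity i []) 1 "" ∈ st.2 then st
        else (st.1 ++ PySem.List.pyGetD (PySem.List.pyGetD target_entity i []) 1 "" ++ ", ",
              st.2 ++ [PySem.List.pyGetD (PySem.List.pyGetD target_entity i []) 1 ""])
      else st) st)
    ("", ([] : List String))

-- ===== PORT B =====
def identify_primary_entity_alt (primary_action_id_list : List String) (target_action : List (List String)) (target_entity : List (List String)) : String × List String :=
  let positions : PySem.Dict String (List Int) :=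
    (PySem.List.enumerate target_action 0).foldl
      (fun d p => if p.2 = [] then d
                  else d.modify (PySem.List.pyGetD p.2 0 "") [] (fun l => l ++ [p.1]))
      PySem.Dict.empty
  let res :=
    primary_action_id_list.foldl (fun st primary_action_id =>
      (positions.getD primary_action_id []).foldl (fun st i =>
        if PySem.Set.contains st.1 (PySem.List.pyGetD (PySem.List.pyGetD target_entity i []) 1 "") then st
        else (PySem.Set.add st.1 (PySem.List.pyGetD (PySem.List.pyGetD target_entity i []) 1 ""),
              st.2 ++ [PySem.List.pyGetD (PySem.List.pyGetD target_entity i []) 1 ""]))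
        st)
      ((PySem.Set.empty : PySem.Set String), ([] : List String))
  (PySem.Str.join "" (res.2.map (fun e => e ++ ", ")), res.2)

-- ===== PRECONDITION & SPEC =====
-- Pre_ excludes exactly the inputs where Python A raises IndexError: an empty
-- target_action row when the id list is nonempty (so the scan reaches it), or a
-- matched row whose target_entity row is missing or shorter than 2.
def Pre_identify_primary_entity (primary_action_id_list : List String) (target_action : List (List String)) (target_entity : List (List String)) : Prop :=
  (primary_action_id_list ≠ [] → ∀ row ∈ target_action, row ≠ []) ∧
  ∀ i < target_action.length,
    (target_action.getD i []).headD "" ∈ primary_action_id_list →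
      i < target_entity.length ∧ 2 ≤ (target_entity.getD i []).length
instance (primary_action_id_list : List String) (target_action : List (List String)) (target_entity : List (List String)) : Decidable (Pre_identify_primary_entity primary_action_id_list target_action target_entity) := by unfold Pre_identify_primary_entity; infer_instance

def pvWitness_identify_primary_entity : List String × List (List String) × List (List String) :=
  (["a"], [["a", "eat"]], [["a", "apple"]])

def Spec_identify_primary_entity (primary_action_id_list : List String) (target_action : List (List String)) (target_entity : List (List String)) (out : String × List String) : Prop := out = identify_primary_entity_alt primary_action_id_list target_action target_entity
instance (primary_action_id_list : List String) (target_action : List (List String)) (target_entity : List (List String)) (out : String × List String) : Decidable (Spec_identify_primary_entity primary_action_id_list target_action target_entity out) := by unfold Spec_identify_primary_entity; infer_instance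

-- ===== CLAIM (what is proved, stated in full; the proofs are below) =====
def Claim_equal_identify_primary_entity : Prop := ∀ (primary_action_id_list : List String) (target_action : List (List String)) (target_entity : List (List String)), Dom_identify_primary_entity primary_action_id_list target_action target_entity → Pre_identify_primary_entity primary_action_id_list target_action target_entity → Spec_identify_primary_entity primary_action_id_list target_action target_entity (identify_primary_entity primary_action_id_list target_action target_entity)

-- ===== LEMMAS AND PROOFS =====

-- the entity A/B read for a matched row position i
def pvEnt (target_entity : List (List String)) (i : Int) : String :=
  PySem.List.pyGetD (PySem.List.pyGetD target_entity i []) 1 ""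

-- the matched row positions for one primary id, in order
def pvS (target_action : List (List String)) (pid : String) : List Int :=
  (PySem.List.pyRange 0 (target_action.length : Int) 1).filter
    (fun i => pid == PySem.List.pyGetD (PySem.List.pyGetD target_action i []) 0 "")

-- A's / B's inner-loop bodies
def pvBodyA (target_entity : List (List String)) (st : String × List String) (i : Int) : String × List String :=
  if pvEnt target_entity i ∈ st.2 then st
  else (st.1 ++ pvEnt target_entity i ++ ", ", st.2 ++ [pvEnt target_entity i])

def pvBodyB (target_entity : List (List String)) (st : PySem.Set String × List String) (i : Int) : PySem.Set String × List String :=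
  if PySem.Set.contains st.1 (pvEnt target_entity i) then st
  else (PySem.Set.add st.1 (pvEnt target_entity i), st.2 ++ [pvEnt target_entity i])

-- the string A accumulates, as a function of the list accumulated so far
def pvJ (l : List String) : String := PySem.Str.join "" (l.map (fun e => e ++ ", "))

-- coupling invariant between A's state and B's state
def pvR (a : String × List String) (b : PySem.Set String × List String) : Prop :=
  a.2 = b.2 ∧ b.1 = b.2 ∧ a.1 = pvJ b.2

theorem pv_join_nil_flatten (xss : List (List Char)) : PySem.Chars.join [] xss = xss.flatten := by
  induction xss with
  | nil => rfl
  | cons h t ih =>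
    cases t with
    | nil => simp [PySem.Chars.join, List.intercalate]
    | cons h2 t2 => rw [PySem.Chars.join_cons_cons] at *; simp_all

theorem pvJ_append (l : List String) (e : String) : pvJ (l ++ [e]) = pvJ l ++ e ++ ", " := by
  simp only [pvJ, PySem.Str.join, String.toList_empty, List.map_append, List.map_cons,
    List.map_nil, pv_join_nil_flatten, List.flatten_append]
  simp [String.ofList_append, String.ofList_toList, String.append_assoc]

-- with all rows nonempty, B's guarded index build never skips a row
theorem pv_positions_guard (target_action : List (List String))
    (hrows : ∀ row ∈ target_action, row ≠ []) :
    (PySem.List.enumerate target_action 0).foldl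
        (fun d p => if p.2 = [] then d
                    else d.modify (PySem.List.pyGetD p.2 0 "") [] (fun l => l ++ [p.1]))
        PySem.Dict.empty
      = (PySem.List.enumerate target_action 0).foldl
        (fun d p => d.modify (PySem.List.pyGetD p.2 0 "") [] (fun l => l ++ [p.1]))
        PySem.Dict.empty := by
  apply PySem.List.foldl_congr_mem
  intro d p hp
  obtain ⟨k, hk, rfl⟩ := (PySem.List.mem_enumerate_iff _ _ _).1 hp
  have : target_action[k] ≠ [] := hrows _ (List.getElem_mem hk)
  simp [this]

-- B's index lookup is exactly the list of matched positions, in order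
theorem pv_positions_getD (target_action : List (List String)) (pid : String)
    (hrows : ∀ row ∈ target_action, row ≠ []) :
    (((PySem.List.enumerate target_action 0).foldl
        (fun d p => if p.2 = [] then d
                    else d.modify (PySem.List.pyGetD p.2 0 "") [] (fun l => l ++ [p.1]))
        PySem.Dict.empty).getD pid [])
      = pvS target_action pid := by
  rw [pv_positions_guard target_action hrows]
  have hmap : (PySem.List.enumerate target_action 0).foldl
        (fun d p => d.modify (PySem.List.pyGetD p.2 0 "") [] (fun l => l ++ [p.1]))
        PySem.Dict.empty
      = ((PySem.List.enumerate target_action 0).map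
          (fun p => (PySem.List.pyGetD p.2 0 "", p.1))).foldl
        (fun d q => d.modify q.1 [] (fun l => l ++ [q.2])) PySem.Dict.empty := by
    rw [List.foldl_map]
  rw [hmap, PySem.Dict.getD_foldl_modify_append,
    PySem.List.enumerate_eq_map_pyRange (d := [])]
  simp only [PySem.Dict.getD_empty, List.nil_append, List.map_map, List.filter_map,
    Function.comp_def, List.map_map]
  unfold pvS
  rw [List.map_id_fun']
  exact List.filter_congr (fun i _ => Bool.beq_comm ..)

-- one inner-loop step preserves the invariant
theorem pv_body_rel (target_entity : List (List String)) (i : Int)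
    (a : String × List String) (b : PySem.Set String × List String) (h : pvR a b) :
    pvR (pvBodyA target_entity a i) (pvBodyB target_entity b i) := by
  obtain ⟨h2, h1, hs⟩ := h
  unfold pvBodyA pvBodyB
  by_cases hm : pvEnt target_entity i ∈ a.2
  · have hc : PySem.Set.contains b.1 (pvEnt target_entity i) = true := by
      rw [PySem.Set.contains_eq_decide, h1, ← h2]; simpa
    rw [if_pos hm, if_pos hc]
    exact ⟨h2, h1, hs⟩
  · have hc : PySem.Set.contains b.1 (pvEnt target_entity i) = false := by
      rw [PySem.Set.contains_eq_decide, h1, ← h2]; simpa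
    have hnb : pvEnt target_entity i ∉ b.1 := by
      simpa [PySem.Set.contains_eq_decide] using hc
    have hnb2 : pvEnt target_entity i ∉ b.2 := h1 ▸ hnb
    rw [if_neg hm, if_neg (by simp [hnb])]
    refine ⟨by simp [h2], ?_, ?_⟩
    · simp [PySem.Set.add, hnb2, h1]
    · simp [hs, pvJ_append]

-- folding coupled loops over the same list preserves the invariant
theorem pv_foldl_rel {α β γ : Type} (R : β → γ → Prop) (f : β → α → β) (g : γ → α → γ)
    (hstep : ∀ a b x, R a b → R (f a x) (g b x)) :
    ∀ (l : List α) (a : β) (b : γ), R a b → R (l.foldl f a) (l.foldl g b) := by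
  intro l
  induction l with
  | nil => intro a b h; exact h
  | cons x t ih => intro a b h; exact ih _ _ (hstep a b x h)

theorem pv_ports_eq (primary_action_id_list : List String) (target_action : List (List String)) (target_entity : List (List String))
    (hrows : primary_action_id_list ≠ [] → ∀ row ∈ target_action, row ≠ []) :
    identify_primary_entity primary_action_id_list target_action target_entity
      = identify_primary_entity_alt primary_action_id_list target_action target_entity := by
  cases hids : primary_action_id_list with
  | nil => rfl
  | cons x t =>
    have hrows' : ∀ row ∈ target_action, row ≠ [] := hrows (by simp [hids])
    have hrel := pv_foldl_rel pvR
      (f := fun st primary_action_id =>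
        (PySem.List.pyRange 0 (target_action.length : Int) 1).foldl (fun st i =>
          if primary_action_id == PySem.List.pyGetD (PySem.List.pyGetD target_action i []) 0 "" then
            pvBodyA target_entity st i
          else st) st)
      (g := fun st primary_action_id =>
        ((((PySem.List.enumerate target_action 0).foldl
            (fun d p => if p.2 = [] then d
                        else d.modify (PySem.List.pyGetD p.2 0 "") [] (fun l => l ++ [p.1]))
            PySem.Dict.empty).getD primary_action_id [])).foldl
          (fun st i => pvBodyB target_entity st i) st)
      (fun a b pid hab => by
        beta_reduce
        rw [PySem.List.foldl_if_eq_foldl_filter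
              (p := fun i => pid == PySem.List.pyGetD (PySem.List.pyGetD target_action i []) 0 "")
              (f := pvBodyA target_entity),
            pv_positions_getD target_action pid hrows']
        exact pv_foldl_rel pvR _ _ (fun a b i => pv_body_rel target_entity i a b)
          (pvS target_action pid) a b hab)
      (x :: t) ("", []) (PySem.Set.empty, []) ⟨rfl, rfl, rfl⟩
    obtain ⟨h2, _, hs⟩ := hrel
    unfold identify_primary_entity identify_primary_entity_alt

    exact Prod.ext hs h2

-- ===== VERDICT (by name: the statement is the Claim_ definition above) =====
theorem identify_primary_entity_spec : Claim_equal_identify_primary_entity := by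
  intro primary_action_id_list target_action target_entity _ hpre
  unfold Spec_identify_primary_entity
  exact pv_ports_eq primary_action_id_list target_action target_entity hpre.1
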